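-- pv_equiv track=rewrite | github.com/Ani0202/DSA-solved-problems | Occurence of Each Number.py | findOccurences
-- ===== SOURCE A (Python) =====
-- def findOccurences(A):
--     count = dict()
--     for i in range(len(A)):
--         count[A[i]] = count.get(A[i], 0) + 1
--
--     ans = []
--     for k in sorted(count.keys()):
--         ans.append(count[k])
--
--     return ans
-- ===== SOURCE B (Python) =====
-- def findOccurences(A):
--     ans = []
--     cur = None
--     cnt = 0
--     for x in sorted(A):
--         if x == cur:
--             cnt += 1
--         else:
--             if cnt:
--                 ans.append(cnt)
--             cur = x
--             cnt = 1
--     if cnt: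
--         ans.append(cnt)
--     return ans
-- ===== Notes on version B (the rewrite author's own statement) =====
-- stated objective: faster
-- what changed: B builds no dict: it sorts a copy of A once and emits run lengths in a single pass over the sorted list, instead of counting into a dict and then iterating the dict's sorted keys with per-key lookups.
import Mathlib
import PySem

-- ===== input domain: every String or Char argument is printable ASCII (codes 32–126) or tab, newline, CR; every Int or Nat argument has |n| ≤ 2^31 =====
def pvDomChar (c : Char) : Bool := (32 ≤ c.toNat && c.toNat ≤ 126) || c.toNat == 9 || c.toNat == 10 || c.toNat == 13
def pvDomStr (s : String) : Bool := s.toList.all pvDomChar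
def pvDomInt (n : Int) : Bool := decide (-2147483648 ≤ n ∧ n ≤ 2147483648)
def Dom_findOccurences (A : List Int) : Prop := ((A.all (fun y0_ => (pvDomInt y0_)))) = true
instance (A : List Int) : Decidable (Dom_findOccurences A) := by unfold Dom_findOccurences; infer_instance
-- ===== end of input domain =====

-- B replaces A's dict-count-then-sorted-keys with sort-once-then-run-length single pass; same return value.

-- ===== PORT A =====
def findOccurences (A : List Int) : List Int :=
  -- count = dict(); for i in range(len(A)): count[A[i]] = count.get(A[i], 0) + 1
  let count : PySem.Dict Int Int :=
    (PySem.List.pyRange 0 (A.length : Int) 1).foldl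
      (fun d i => d.insert (PySem.List.pyGetD A i 0) (d.getD (PySem.List.pyGetD A i 0) 0 + 1))
      PySem.Dict.empty
  -- ans = []; for k in sorted(count.keys()): ans.append(count[k])
  -- count[k]: k is always a key of count here, so getD k 0 is exact (no KeyError reachable)
  (PySem.List.sorted count.keys (fun k => k) false).foldl
    (fun ans k => ans ++ [count.getD k 0]) []

-- ===== PORT B =====
def findOccurences_alt (A : List Int) : List Int :=
  -- cur = None; cnt = 0; single pass over sorted(A), appending each finished run length
  let st := (PySem.List.sorted A (fun x => x) false).foldl
    (fun (st : Option Int × Int × List Int) x =>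
      if some x == st.1 then (st.1, st.2.1 + 1, st.2.2)
      else (some x, 1, if st.2.1 ≠ 0 then st.2.2 ++ [st.2.1] else st.2.2))
    (none, 0, [])
  if st.2.1 ≠ 0 then st.2.2 ++ [st.2.1] else st.2.2

-- ===== PRECONDITION & SPEC =====
def Spec_findOccurences (A : List Int) (out : List Int) : Prop := out = findOccurences_alt A
instance (A : List Int) (out : List Int) : Decidable (Spec_findOccurences A out) := by unfold Spec_findOccurences; infer_instance

-- ===== CLAIM (what is proved, stated in full; the proofs are below) =====
def Claim_equal_findOccurences : Prop := ∀ (A : List Int), Dom_findOccurences A → Spec_findOccurences A (findOccurences A)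

-- ===== LEMMAS AND PROOFS =====
lemma sorted_ofList_cons (x : Int) (t : List Int) (hx : ∀ y ∈ t, x ≤ y) :
    PySem.List.sorted (PySem.Set.ofList (x :: t)) (fun k => k) false
      = x :: PySem.List.sorted (PySem.Set.ofList (t.filter (fun y => decide (x < y)))) (fun k => k) false := by
  apply PySem.List.sorted_eq_of_perm_of_pairwise_lt
  · rw [List.perm_ext_iff_of_nodup]
    · intro a
      simp only [List.mem_cons, PySem.List.mem_sorted, PySem.Set.mem_ofList, List.mem_filter,
        decide_eq_true_eq]
      constructor
      · rintro (h | h)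
        · exact .inl h
        · exact .inr h.1
      · rintro (h | h)
        · exact .inl h
        · by_cases hax : a = x
          · exact .inl hax
          · exact .inr ⟨h, lt_of_le_of_ne (hx a h) (Ne.symm hax)⟩
    · refine List.nodup_cons.mpr ⟨?_, ?_⟩
      · simp only [PySem.List.mem_sorted, PySem.Set.mem_ofList, List.mem_filter,
          decide_eq_true_eq]
        rintro ⟨-, h⟩; exact lt_irrefl x h
      · exact ((PySem.List.sorted_perm _ _ _).symm).nodup (PySem.Set.nodup_ofList _)
    · exact PySem.Set.nodup_ofList _
  · refine List.pairwise_cons.mpr ⟨?_, ?_⟩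
    · intro a ha
      simp only [PySem.List.mem_sorted, PySem.Set.mem_ofList, List.mem_filter,
        decide_eq_true_eq] at ha
      exact ha.2
    · exact PySem.List.sorted_ofList_pairwise_lt _


def pvStep (st : Option Int × Int × List Int) (x : Int) : Option Int × Int × List Int :=
  if some x == st.1 then (st.1, st.2.1 + 1, st.2.2)
  else (some x, 1, if st.2.1 ≠ 0 then st.2.2 ++ [st.2.1] else st.2.2)

def pvFin (st : Option Int × Int × List Int) : List Int :=
  if st.2.1 ≠ 0 then st.2.2 ++ [st.2.1] else st.2.2

lemma b_aux (t : List Int) : ∀ (x cnt : Int) (ans : List Int),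
    t.Pairwise (· ≤ ·) → (∀ y ∈ t, x ≤ y) → 0 < cnt →
    pvFin (t.foldl pvStep (some x, cnt, ans))
      = ans ++ (cnt + (t.count x : Int)) ::
          (PySem.List.sorted (PySem.Set.ofList (t.filter (fun y => decide (x < y)))) (fun k => k) false).map
            (fun k => (t.count k : Int)) := by
  induction t with
  | nil =>
    intro x cnt ans _ _ hcnt
    simp [pvFin, hcnt.ne']
  | cons y t' ih =>
    intro x cnt ans ht hx hcnt
    have hx' := hx y (List.mem_cons_self)
    have ht' := (List.pairwise_cons.mp ht).2
    have hyall := (List.pairwise_cons.mp ht).1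
    by_cases hyx : y = x
    · subst hyx
      simp only [List.foldl_cons, pvStep, beq_self_eq_true, if_true]
      rw [ih y (cnt + 1) ans ht' hyall (by omega)]
      have hfil : t'.filter (fun z => decide (y < z)) = (y :: t').filter (fun z => decide (y < z)) := by
        simp
      rw [← hfil]
      congr 1
      have hcy : ((y :: t').count y : Int) = (t'.count y : Int) + 1 := by
        simp
      rw [hcy]
      congr 1
      · ring
      · apply List.map_congr_left
        intro k hk
        simp only [PySem.List.mem_sorted, PySem.Set.mem_ofList, List.mem_filter,
          decide_eq_true_eq] at hk
        simp [List.count_cons]; exact ne_of_lt hk.2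
    · have hlt : x < y := lt_of_le_of_ne hx' (Ne.symm hyx)
      have hstep : pvStep (some x, cnt, ans) y = (some y, 1, ans ++ [cnt]) := by
        simp [pvStep, hyx, hcnt.ne']
      simp only [List.foldl_cons, hstep]
      rw [ih y 1 (ans ++ [cnt]) ht' hyall one_pos]
      have hcx : ((y :: t').count x : Int) = 0 := by
        have : t'.count x = 0 := by
          rw [List.count_eq_zero]
          intro hmem
          exact absurd (hyall x hmem) (by omega)
        simp [this, hyx]
      have hfilx : (y :: t').filter (fun z => decide (x < z)) = y :: t' := by
        rw [List.filter_eq_self]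
        intro z hz
        rcases List.mem_cons.mp hz with rfl | hz'
        · simpa using hlt
        · simpa using lt_of_lt_of_le hlt (hyall z hz')
      rw [hcx, hfilx, sorted_ofList_cons y t' hyall, add_zero]
      have hhead : (((y :: t').count y : Nat) : Int) = 1 + (t'.count y : Int) := by
        simp [add_comm]
      have htail :
          (PySem.List.sorted (PySem.Set.ofList (t'.filter (fun z => decide (y < z)))) (fun k => k) false).map
              (fun k => ((y :: t').count k : Int))
            = (PySem.List.sorted (PySem.Set.ofList (t'.filter (fun z => decide (y < z)))) (fun k => k) false).map
              (fun k => (t'.count k : Int)) := by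
        apply List.map_congr_left
        intro k hk
        simp only [PySem.List.mem_sorted, PySem.Set.mem_ofList, List.mem_filter,
          decide_eq_true_eq] at hk
        simp [List.count_cons]; exact ne_of_lt hk.2
      simp only [List.map_cons, hhead, htail]
      simp

def pvCanon (s : List Int) : List Int :=
  (PySem.List.sorted (PySem.Set.ofList s) (fun k => k) false).map (fun k => (s.count k : Int))

lemma b_run (s : List Int) (hs : s.Pairwise (· ≤ ·)) :
    pvFin (s.foldl pvStep (none, 0, [])) = pvCanon s := by
  cases s with
  | nil => rfl
  | cons x t =>
    have hx := (List.pairwise_cons.mp hs).1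
    have ht := (List.pairwise_cons.mp hs).2
    have hstep : pvStep (none, 0, []) x = (some x, 1, []) := by simp [pvStep]
    rw [List.foldl_cons, hstep, b_aux t x 1 [] ht hx one_pos]
    unfold pvCanon
    rw [sorted_ofList_cons x t hx]
    have hhead : ((x :: t).count x : Int) = 1 + (t.count x : Int) := by
      simp [add_comm]
    have htail :
        (PySem.List.sorted (PySem.Set.ofList (t.filter (fun z => decide (x < z)))) (fun k => k) false).map
            (fun k => ((x :: t).count k : Int))
          = (PySem.List.sorted (PySem.Set.ofList (t.filter (fun z => decide (x < z)))) (fun k => k) false).map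
            (fun k => (t.count k : Int)) := by
      apply List.map_congr_left
      intro k hk
      simp only [PySem.List.mem_sorted, PySem.Set.mem_ofList, List.mem_filter,
        decide_eq_true_eq] at hk
      rw [List.count_cons_of_ne (ne_of_lt hk.2)]
    simp only [List.map_cons, hhead, htail, List.nil_append]

lemma ofList_sorted_perm (A : List Int) :
    (PySem.Set.ofList (PySem.List.sorted A (fun x => x) false)).Perm (PySem.Set.ofList A) := by
  rw [List.perm_ext_iff_of_nodup (PySem.Set.nodup_ofList _) (PySem.Set.nodup_ofList _)]
  intro a
  simp [PySem.Set.mem_ofList, PySem.List.mem_sorted]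

lemma canon_sorted (A : List Int) :
    pvCanon (PySem.List.sorted A (fun x => x) false) = pvCanon A := by
  unfold pvCanon
  rw [PySem.List.sorted_eq_sorted_of_perm _ _ _ (fun a b h => h) (ofList_sorted_perm A)]
  apply List.map_congr_left
  intro k _
  rw [(PySem.List.sorted_perm A (fun x => x) false).count_eq]

lemma a_eq_canon (A : List Int) : findOccurences A = pvCanon A := by
  unfold findOccurences pvCanon
  have h := PySem.List.foldl_pyRange_zero_pyGetD' (xs := A) (d := 0)
    (f := fun (d : PySem.Dict Int Int) v => d.insert v (d.getD v 0 + 1))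
    (init := PySem.Dict.empty)
  rw [h.trans (PySem.Dict.foldl_insert_getD_add_one_eq_counter A),
    PySem.List.foldl_append_singleton_eq_map, PySem.Dict.keys_counter]
  simp [PySem.Dict.getD_counter]

lemma b_eq_canon_sorted (A : List Int) :
    findOccurences_alt A = pvCanon (PySem.List.sorted A (fun x => x) false) :=
  b_run _ (PySem.List.sorted_pairwise A (fun x => x))

-- ===== VERDICT (by name: the statement is the Claim_ definition above) =====
theorem findOccurences_spec : Claim_equal_findOccurences := by
  intro A _
  show findOccurences A = findOccurences_alt A
  rw [a_eq_canon, b_eq_canon_sorted, canon_sorted]
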